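-- pv_equiv track=rewrite | github.com/AgintAI/agi-tools-client | agi_tools_client/cli.py | get_app_groups
-- ===== SOURCE A (Python) =====
-- from typing import Any, Dict, Optional, Tuple, Union
--
-- def get_app_groups(spec: Dict[str, Any]) -> Dict[str, Dict[str, Any]]:
--     """Group paths by their root segment."""
--     groups = {}
--     for path_str, path_item in spec.get("paths", {}).items():
--         if path_str == "/health":  # Skip health check endpoint
--             continue
--
--         parts = path_str.strip("/").split("/")
--         if len(parts) >= 1:
--             group_name = parts[0]
--             if group_name not in groups:
--                 groups[group_name] = {}
--             groups[group_name][path_str] = path_item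
--
--     return groups
-- ===== SOURCE B (Python) =====
-- def get_app_groups(spec):
--     """Group paths by their root segment."""
--     paths = spec.get("paths", {})
--
--     def key(p):
--         return p.strip("/").split("/")[0]
--
--     order = dict.fromkeys(key(p) for p in paths if p != "/health")
--     return {g: {p: v for p, v in paths.items() if p != "/health" and key(p) == g}
--             for g in order}
-- ===== Notes on version B (the rewrite author's own statement) =====
-- stated objective: alternative
-- what changed: A builds the grouping in one pass over paths, maintaining a dict-of-dicts it inserts into; B first computes the ordered deduplicated list of group keys (dict.fromkeys) and then builds each group with one filter pass over the paths, so no incremental nested-dict state is kept.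
import Mathlib
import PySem

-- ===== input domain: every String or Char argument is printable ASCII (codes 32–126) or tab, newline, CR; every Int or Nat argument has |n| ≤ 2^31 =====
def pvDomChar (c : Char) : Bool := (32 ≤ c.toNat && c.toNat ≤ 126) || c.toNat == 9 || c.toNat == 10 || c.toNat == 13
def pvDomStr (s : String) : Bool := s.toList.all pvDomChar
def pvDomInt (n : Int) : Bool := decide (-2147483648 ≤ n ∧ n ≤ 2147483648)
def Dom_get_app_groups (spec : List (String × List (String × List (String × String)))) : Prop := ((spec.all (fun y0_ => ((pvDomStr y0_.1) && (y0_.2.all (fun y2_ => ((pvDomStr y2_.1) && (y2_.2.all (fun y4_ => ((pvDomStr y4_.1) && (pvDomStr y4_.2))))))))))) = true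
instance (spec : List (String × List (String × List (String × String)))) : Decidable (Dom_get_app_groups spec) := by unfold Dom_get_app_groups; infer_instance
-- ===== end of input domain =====

-- B replaces A's incremental dict-of-dicts pass by "dedup the group keys, then one filter pass
-- per group" (objective: alternative decomposition; not claimed faster).

-- ===== PORT A =====
-- A-side helper: the body of A's for-loop over spec.get("paths", {}).items()
def pvStepA (groups : PySem.Dict String (PySem.Dict String (List (String × String))))
    (kv : String × List (String × String)) :
    PySem.Dict String (PySem.Dict String (List (String × String))) :=
  if kv.1 == "/health" then groups
  else
    let parts := (PySem.Str.split? (PySem.Str.stripChars kv.1 "/") "/").getD []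
    if 1 ≤ parts.length then
      let group_name := PySem.List.pyGetD parts 0 ""
      let groups' := if groups.contains group_name then groups
                     else groups.insert group_name PySem.Dict.empty
      groups'.insert group_name ((groups'.getD group_name PySem.Dict.empty).insert kv.1 kv.2)
    else groups

def get_app_groups (spec : List (String × List (String × List (String × String)))) :
    List (String × List (String × List (String × String))) :=
  let paths := (PySem.Dict.ofList spec).getD "paths" []
  let groups := (PySem.Dict.ofList paths).items.foldl pvStepA PySem.Dict.empty
  groups.items.map (fun gi => (gi.1, gi.2.items))

-- ===== PORT B =====
-- B-side helper: key(p) = p.strip("/").split("/")[0]  (split("/") is never empty, so index 0 is in range)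
def pvKey (p : String) : String :=
  PySem.List.pyGetD ((PySem.Str.split? (PySem.Str.stripChars p "/") "/").getD []) 0 ""

def get_app_groups_alt (spec : List (String × List (String × List (String × String)))) :
    List (String × List (String × List (String × String))) :=
  let paths := (PySem.Dict.ofList ((PySem.Dict.ofList spec).getD "paths" [])).items
  let order := PySem.List.dedup
    ((paths.filter (fun kv => kv.1 != "/health")).map (fun kv => pvKey kv.1))
  order.map (fun g => (g, paths.filter (fun kv => kv.1 != "/health" && pvKey kv.1 == g)))

-- ===== PRECONDITION & SPEC =====
def Spec_get_app_groups (spec : List (String × List (String × List (String × String)))) (out : List (String × List (String × List (String × String)))) : Prop := out = get_app_groups_alt spec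
instance (spec : List (String × List (String × List (String × String)))) (out : List (String × List (String × List (String × String)))) : Decidable (Spec_get_app_groups spec out) := by unfold Spec_get_app_groups; infer_instance

-- ===== CLAIM (what is proved, stated in full; the proofs are below) =====
def Claim_equal_get_app_groups : Prop := ∀ (spec : List (String × List (String × List (String × String)))), Dom_get_app_groups spec → Spec_get_app_groups spec (get_app_groups spec)

-- ===== LEMMAS AND PROOFS =====

-- s.split("/") is never the empty list
theorem pvSplitOnGo_ne_nil (sep : List Char) :
    ∀ (fuel : Nat) (l cur : List Char) (acc : List (List Char)),
      PySem.Chars.splitOn.go sep fuel l cur acc ≠ [] := by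
  intro fuel
  induction fuel with
  | zero => intro l cur acc; simp [PySem.Chars.splitOn.go]
  | succ n ih =>
      intro l cur acc
      cases l with
      | nil => simp [PySem.Chars.splitOn.go]
      | cons c rest =>
          rw [PySem.Chars.splitOn.go]
          split
          · exact ih _ _ _
          · exact ih _ _ _

theorem pvSplit_ne_nil (s : String) :
    (PySem.Str.split? s "/").getD [] ≠ [] := by
  simp [PySem.Str.split?, PySem.Chars.split?, PySem.Chars.splitOn]
  exact pvSplitOnGo_ne_nil _ _ _ _ _

-- A's loop body, restated via pvKey (the length guard always holds; the two outer
-- writes collapse to one insert)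
theorem pvStepA_eq (d : PySem.Dict String (PySem.Dict String (List (String × String))))
    (p : String) (v : List (String × String)) (hp : (p == "/health") = false) :
    pvStepA d (p, v) =
      if d.contains (pvKey p)
      then d.insert (pvKey p) ((d.getD (pvKey p) PySem.Dict.empty).insert p v)
      else d.insert (pvKey p) (PySem.Dict.empty.insert p v) := by
  have hne := pvSplit_ne_nil (PySem.Str.stripChars p "/")
  have hlen : 1 ≤ ((PySem.Str.split? (PySem.Str.stripChars p "/") "/").getD []).length :=
    Nat.one_le_iff_ne_zero.mpr (by simpa [List.length_eq_zero_iff] using hne)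
  unfold pvStepA
  simp only [hp, if_false, Bool.false_eq_true, hlen, if_true]
  by_cases hc : d.contains (pvKey p) = true
  · simp only [pvKey] at hc
    simp [pvKey, hc]
  · simp only [Bool.not_eq_true, pvKey] at hc
    simp [pvKey, hc, PySem.Dict.getD_insert_self, PySem.Dict.insert_insert_self]

-- B's per-group filter
def pvFilt (Q : List (String × List (String × String))) (g : String) :
    List (String × List (String × String)) :=
  Q.filter (fun kv => kv.1 != "/health" && pvKey kv.1 == g)

set_option maxHeartbeats 1000000 in
-- the loop invariant: A's dict-of-dicts equals B's dedup-then-filter view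
theorem pvMain (Q : List (String × List (String × String)))
    (h : (Q.map Prod.fst).Nodup) :
    (Q.foldl pvStepA PySem.Dict.empty).items
      = (PySem.List.dedup ((Q.filter (fun kv => kv.1 != "/health")).map (fun kv => pvKey kv.1))).map
          (fun g => (g, PySem.Dict.mk (pvFilt Q g))) := by
  induction Q using List.reverseRecOn with
  | nil => rfl
  | append_singleton Q x ih =>
    obtain ⟨p, v⟩ := x
    rw [List.map_append, List.nodup_append] at h
    have ihh := ih h.1
    have hpnot : p ∉ Q.map Prod.fst := by
      intro hmem; exact h.2.2 p hmem p (by simp) rfl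
    rw [List.foldl_append, List.foldl_cons, List.foldl_nil]
    by_cases hp : p = "/health"
    · subst hp
      have hstep : pvStepA (Q.foldl pvStepA PySem.Dict.empty) ("/health", v)
          = Q.foldl pvStepA PySem.Dict.empty := by
        simp [pvStepA]
      rw [hstep, ihh]
      have hfilt : (Q ++ [("/health", v)]).filter (fun kv => kv.1 != "/health")
          = Q.filter (fun kv => kv.1 != "/health") := by simp [List.filter_append]
      rw [hfilt]
      apply List.map_congr_left
      intro g _
      have : pvFilt (Q ++ [("/health", v)]) g = pvFilt Q g := by
        simp [pvFilt, List.filter_append]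
      rw [this]
    · have hpb : (p == "/health") = false := by simp [hp]
      rw [pvStepA_eq _ _ _ hpb]
      have hkeys : (Q.foldl pvStepA PySem.Dict.empty).keys
          = PySem.List.dedup ((Q.filter (fun kv => kv.1 != "/health")).map (fun kv => pvKey kv.1)) := by
        simp only [PySem.Dict.keys, ihh, List.map_map, Function.comp_def]
        simp
      have hknd : (Q.foldl pvStepA PySem.Dict.empty).keys.Nodup := by
        rw [hkeys]; exact PySem.List.nodup_dedup _
      have hcont : (Q.foldl pvStepA PySem.Dict.empty).contains (pvKey p)
          = decide (pvKey p ∈ PySem.List.dedup ((Q.filter (fun kv => kv.1 != "/health")).map (fun kv => pvKey kv.1))) := by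
        rw [PySem.Dict.contains_eq_decide_mem_keys, hkeys]
      have hfiltnew : (Q ++ [(p, v)]).filter (fun kv => kv.1 != "/health")
          = Q.filter (fun kv => kv.1 != "/health") ++ [(p, v)] := by
        simp [List.filter_append, hp]
      by_cases hmem : pvKey p ∈ PySem.List.dedup ((Q.filter (fun kv => kv.1 != "/health")).map (fun kv => pvKey kv.1))
      · -- group already present: the outer insert rewrites one entry in place
        have hc : (Q.foldl pvStepA PySem.Dict.empty).contains (pvKey p) = true := by
          rw [hcont]; simpa using hmem
        rw [if_pos hc]
        have hded : PySem.List.dedup (((Q ++ [(p, v)]).filter (fun kv => kv.1 != "/health")).map (fun kv => pvKey kv.1))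
            = PySem.List.dedup ((Q.filter (fun kv => kv.1 != "/health")).map (fun kv => pvKey kv.1)) := by
          rw [hfiltnew, List.map_append]
          simp only [List.map_cons, List.map_nil]
          rw [PySem.List.dedup_eq_ofList, PySem.Set.ofList_append_singleton]
          rw [PySem.Set.add_of_mem (by simpa [PySem.Set.mem_ofList] using hmem)]
          simp
        rw [hded]
        have hin : (pvKey p, PySem.Dict.mk (pvFilt Q (pvKey p))) ∈ (Q.foldl pvStepA PySem.Dict.empty).items := by
          rw [ihh]; exact List.mem_map_of_mem hmem
        have hgetD := PySem.Dict.getD_of_mem_items _ hin hknd PySem.Dict.empty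
        rw [hgetD]
        have hpinner : ((PySem.Dict.mk (pvFilt Q (pvKey p))).insert p v)
            = PySem.Dict.mk (pvFilt Q (pvKey p) ++ [(p, v)]) := by
          apply PySem.Dict.ext
          rw [PySem.Dict.items_insert_of_not_contains]
          rw [PySem.Dict.contains_eq_decide_mem_keys]
          simp only [PySem.Dict.keys, decide_eq_false_iff_not]
          intro hmm
          exact hpnot (by
            rcases List.mem_map.mp hmm with ⟨kv, hkv, hfst⟩
            exact hfst ▸ List.mem_map_of_mem (List.mem_of_mem_filter hkv))
        rw [hpinner]
        rw [PySem.Dict.items_insert_of_contains _ _ hc, ihh, List.map_map]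
        apply List.map_congr_left
        intro g hg
        by_cases hgg : g = pvKey p
        · subst hgg
          have h2 : pvFilt (Q ++ [(p, v)]) (pvKey p) = pvFilt Q (pvKey p) ++ [(p, v)] := by
            simp [pvFilt, List.filter_append, hp]
          simp [Function.comp, h2]
        · have h3 : (pvKey p == g) = false := by
            simp [beq_eq_false_iff_ne]; exact fun e => hgg e.symm
          have h2 : pvFilt (Q ++ [(p, v)]) g = pvFilt Q g := by
            simp [pvFilt, List.filter_append, hp, h3]
          simp [Function.comp, hgg, h2]
      · -- new group: the entry is appended at the end
        have hc : (Q.foldl pvStepA PySem.Dict.empty).contains (pvKey p) = false := by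
          rw [hcont]; simpa using hmem
        rw [if_neg (by simp [hc])]
        have hded : PySem.List.dedup (((Q ++ [(p, v)]).filter (fun kv => kv.1 != "/health")).map (fun kv => pvKey kv.1))
            = PySem.List.dedup ((Q.filter (fun kv => kv.1 != "/health")).map (fun kv => pvKey kv.1)) ++ [pvKey p] := by
          rw [hfiltnew, List.map_append]
          simp only [List.map_cons, List.map_nil]
          rw [PySem.List.dedup_eq_ofList, PySem.Set.ofList_append_singleton]
          rw [PySem.Set.add_of_not_mem (by simpa [PySem.Set.mem_ofList] using hmem)]
          simp
        rw [hded]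
        have hempty : (PySem.Dict.empty.insert p v) = PySem.Dict.mk [(p, v)] := by
          apply PySem.Dict.ext
          rw [PySem.Dict.items_insert_of_not_contains _ _ (by simp [PySem.Dict.contains_empty])]
          rfl
        rw [hempty]
        rw [PySem.Dict.items_insert_of_not_contains _ _ hc, ihh, List.map_append]
        have hfilt0 : pvFilt Q (pvKey p) = [] := by
          simp only [pvFilt]
          rw [List.filter_eq_nil_iff]
          intro kv hkv
          intro hb
          rw [Bool.and_eq_true] at hb
          apply hmem
          rw [PySem.List.mem_dedup, List.mem_map]
          exact ⟨kv, List.mem_filter.mpr ⟨hkv, hb.1⟩, by simpa using hb.2⟩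
        congr 1
        · apply List.map_congr_left
          intro g hg
          have hgg : g ≠ pvKey p := fun e => hmem (e ▸ hg)
          have h3 : (pvKey p == g) = false := by
            simp [beq_eq_false_iff_ne]; exact fun e => hgg e.symm
          have h2 : pvFilt (Q ++ [(p, v)]) g = pvFilt Q g := by
            simp [pvFilt, List.filter_append, hp, h3]
          rw [h2]
        · have : pvFilt (Q ++ [(p, v)]) (pvKey p) = pvFilt Q (pvKey p) ++ [(p, v)] := by
            simp [pvFilt, List.filter_append, hp]
          simp [this, hfilt0]

-- ===== VERDICT (by name: the statement is the Claim_ definition above) =====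
theorem get_app_groups_spec : Claim_equal_get_app_groups := by
  intro spec _
  unfold Spec_get_app_groups
  show (List.map (fun gi => (gi.1, gi.2.items)) (List.foldl pvStepA PySem.Dict.empty (PySem.Dict.ofList ((PySem.Dict.ofList spec).getD "paths" [])).items).items) = _
  have h : (((PySem.Dict.ofList ((PySem.Dict.ofList spec).getD "paths" [])).items).map Prod.fst).Nodup := by
    have := PySem.Dict.nodup_keys_ofList ((PySem.Dict.ofList spec).getD "paths" [])
    simpa [PySem.Dict.keys] using this
  rw [pvMain _ h, List.map_map]
  apply List.map_congr_left
  intro g _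
  simp [Function.comp, pvFilt]
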